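-- pv_equiv track=rewrite | github.com/fei-felicia-chen/Kattis | practicing/assessment2.py | funcTwins
-- ===== SOURCE A (Python) =====
-- def funcTwins(inputArr, inputSize):
-- 	# Write your code here
--     if inputSize == 1:
--         return inputArr[0]
--     myDict = {}
--     nontwin = 100000
--     for person in inputArr:
--         if person not in myDict:
--             myDict[person] = 1
--         else:
--             myDict[person] += 1
--     for person in myDict:
--         if myDict[person] == 1 and person < nontwin:
--             nontwin = person
--     return nontwin if nontwin != 100000 else -1
-- ===== SOURCE B (Python) =====
-- def funcTwins(inputArr, inputSize):
--     if inputSize == 1: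
--         return inputArr[0]
--     s = sorted(inputArr)
--     n = len(s)
--     i = 0
--     while i < n:
--         j = i + 1
--         while j < n and s[j] == s[i]:
--             j += 1
--         if j - i == 1 and s[i] < 100000:
--             return s[i]
--         i = j
--     return -1
-- ===== Notes on version B (the rewrite author's own statement) =====
-- stated objective: alternative
-- what changed: B sorts a copy of the list and walks it once grouping consecutive equal runs, returning the first run of length exactly 1 whose value is below 100000, instead of A's hash-count pass followed by a dictionary scan with a sentinel minimum.
import Mathlib
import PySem

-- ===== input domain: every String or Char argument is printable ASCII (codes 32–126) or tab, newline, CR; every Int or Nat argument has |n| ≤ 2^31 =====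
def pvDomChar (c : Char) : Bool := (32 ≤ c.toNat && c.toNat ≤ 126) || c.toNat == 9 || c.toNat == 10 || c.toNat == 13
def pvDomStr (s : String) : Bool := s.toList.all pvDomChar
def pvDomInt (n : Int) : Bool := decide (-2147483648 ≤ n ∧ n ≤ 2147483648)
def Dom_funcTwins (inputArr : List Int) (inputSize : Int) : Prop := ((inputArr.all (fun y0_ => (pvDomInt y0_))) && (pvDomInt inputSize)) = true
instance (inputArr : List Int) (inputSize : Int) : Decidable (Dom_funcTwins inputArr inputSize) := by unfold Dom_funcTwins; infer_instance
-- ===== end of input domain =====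

-- B sorts a copy of the list and walks it once over consecutive equal runs instead of
-- A's hash-count pass followed by a dictionary scan (alternative algorithm, not claimed faster).


-- ===== PORT A =====
def funcTwins (inputArr : List Int) (inputSize : Int) : Int :=
  if inputSize == 1 then (PySem.List.pyGet? inputArr 0).getD 0   -- inputArr[0]; Pre_ excludes the empty-list raise
  else
    let myDict : PySem.Dict Int Int := inputArr.foldl (fun d person =>
      if d.contains person = false then d.insert person 1
      else d.modify person 0 (· + 1)) PySem.Dict.empty
    let nontwin : Int := myDict.keys.foldl (fun nontwin person =>
      if myDict.getD person 0 == 1 && decide (person < nontwin) then person else nontwin) 100000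
    if nontwin != 100000 then nontwin else -1

-- ===== PORT B =====
-- the while loop of Source B: each step consumes one run of equal values from the sorted list
def scanRuns : List Int → Int
  | [] => -1
  | x :: xs =>
    if (xs.takeWhile (fun y => y == x)).length == 0 && decide (x < 100000) then x
    else scanRuns (xs.dropWhile (fun y => y == x))
  termination_by l => l.length
  decreasing_by simpa using Nat.lt_succ_of_le (List.length_dropWhile_le _ _)

def funcTwins_alt (inputArr : List Int) (inputSize : Int) : Int :=
  if inputSize == 1 then (PySem.List.pyGet? inputArr 0).getD 0
  else scanRuns (PySem.List.sorted inputArr (fun x => x) false)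

-- ===== PRECONDITION & SPEC =====
-- Pre_ excludes only inputs where A raises IndexError: inputSize == 1 with an empty list (B raises there too).
def Pre_funcTwins (inputArr : List Int) (inputSize : Int) : Prop :=
  inputSize = 1 → inputArr ≠ []
instance (inputArr : List Int) (inputSize : Int) : Decidable (Pre_funcTwins inputArr inputSize) := by unfold Pre_funcTwins; infer_instance
def pvWitness_funcTwins : List Int × Int := ([2, 2, 3], 3)

def Spec_funcTwins (inputArr : List Int) (inputSize : Int) (out : Int) : Prop := out = funcTwins_alt inputArr inputSize
instance (inputArr : List Int) (inputSize : Int) (out : Int) : Decidable (Spec_funcTwins inputArr inputSize out) := by unfold Spec_funcTwins; infer_instance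

-- ===== CLAIM (what is proved, stated in full; the proofs are below) =====
def Claim_equal_funcTwins : Prop := ∀ (inputArr : List Int) (inputSize : Int), Dom_funcTwins inputArr inputSize → Pre_funcTwins inputArr inputSize → Spec_funcTwins inputArr inputSize (funcTwins inputArr inputSize)

-- ===== LEMMAS AND PROOFS =====

-- the common behavioural specification: r is the least element occurring exactly once and below
-- 100000, or -1 when there is none
def IsAnswer (arr : List Int) (r : Int) : Prop :=
  (r = -1 ∧ ∀ y ∈ arr, ¬(arr.count y = 1 ∧ y < 100000)) ∨
  (r ∈ arr ∧ arr.count r = 1 ∧ r < 100000 ∧ ∀ y ∈ arr, arr.count y = 1 → y < 100000 → r ≤ y)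

lemma isAnswer_unique (arr : List Int) (r r' : Int)
    (h : IsAnswer arr r) (h' : IsAnswer arr r') : r = r' := by
  rcases h with ⟨hr, hnone⟩ | ⟨hm, hc, hlt, hmin⟩ <;>
    rcases h' with ⟨hr', hnone'⟩ | ⟨hm', hc', hlt', hmin'⟩
  · omega
  · exact absurd ⟨hc', hlt'⟩ (hnone _ hm')
  · exact absurd ⟨hc, hlt⟩ (hnone' _ hm)
  · exact le_antisymm (hmin _ hm' hc' hlt') (hmin' _ hm hc hlt)

-- ---- A side ----

-- the body of A's second loop, with the dictionary lookup already rewritten to a count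
def stepA (arr : List Int) (nt p : Int) : Int :=
  if ((arr.count p : Int) == 1 && decide (p < nt)) = true then p else nt

lemma stepA_le (arr : List Int) (nt p : Int) : stepA arr nt p ≤ nt := by
  unfold stepA; split_ifs with h
  · simp only [Bool.and_eq_true, decide_eq_true_eq] at h; omega
  · exact le_rfl

lemma build_eq_counter (arr : List Int) :
    arr.foldl (fun d person =>
      if d.contains person = false then d.insert person 1
      else d.modify person 0 (· + 1)) PySem.Dict.empty = PySem.Dict.counter arr := by
  rw [PySem.Dict.counter_eq_foldl]
  congr 1
  funext d person
  by_cases h : d.contains person = false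
  · simp [h, PySem.Dict.insert, PySem.Dict.modify, PySem.Dict.getD_of_not_contains d 0 h]
  · simp [h]

lemma foldA_spec (arr l : List Int) (a : Int) :
    (l.foldl (stepA arr) a = a ∨
      (l.foldl (stepA arr) a ∈ l ∧ arr.count (l.foldl (stepA arr) a) = 1)) ∧
    l.foldl (stepA arr) a ≤ a ∧
    ∀ p ∈ l, arr.count p = 1 → l.foldl (stepA arr) a ≤ p := by
  induction l generalizing a with
  | nil => simp
  | cons x t ih =>
    simp only [List.foldl_cons]
    obtain ⟨h1, h2, h3⟩ := ih (stepA arr a x)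
    have hxa : stepA arr a x = a ∨ (stepA arr a x = x ∧ arr.count x = 1) := by
      unfold stepA; split_ifs with h
      · simp only [Bool.and_eq_true, beq_iff_eq, decide_eq_true_eq] at h
        right; exact ⟨rfl, by exact_mod_cast h.1⟩
      · left; rfl
    have hxle : stepA arr a x ≤ a := stepA_le arr a x
    have hxmin : arr.count x = 1 → stepA arr a x ≤ x := by
      intro hc
      unfold stepA; rw [hc]; split_ifs with h
      · exact le_rfl
      · simp only [Nat.cast_one, beq_self_eq_true, Bool.true_and,
          decide_eq_true_eq] at h
        omega
    refine ⟨?_, le_trans h2 hxle, ?_⟩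
    · rcases h1 with h1 | h1
      · rw [h1]
        rcases hxa with h | h
        · left; exact h
        · right; exact ⟨by rw [h.1]; exact List.mem_cons_self, by rw [h.1]; exact h.2⟩
      · right; exact ⟨List.mem_cons_of_mem _ h1.1, h1.2⟩
    · intro p hp hc
      rcases List.mem_cons.mp hp with rfl | hp
      · exact le_trans h2 (hxmin hc)
      · exact h3 p hp hc

lemma funcTwins_isAnswer (arr : List Int) (n : Int) (hn : ¬ n = 1) :
    IsAnswer arr (funcTwins arr n) := by
  unfold funcTwins
  simp only [beq_iff_eq, hn, if_false]
  rw [build_eq_counter]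
  have hmem : ∀ p : Int, p ∈ (PySem.Dict.counter arr).keys ↔ p ∈ arr := by
    intro p; rw [PySem.Dict.keys_counter]; exact PySem.Set.mem_ofList arr p
  have hfold :
      (fun (nontwin person : Int) =>
        if (PySem.Dict.counter arr).getD person 0 == 1 && decide (person < nontwin)
        then person else nontwin) = stepA arr := by
    funext nt p
    rw [PySem.Dict.getD_counter]
    rfl
  rw [hfold]
  obtain ⟨h1, h2, h3⟩ := foldA_spec arr (PySem.Dict.counter arr).keys 100000
  set r := (PySem.Dict.counter arr).keys.foldl (stepA arr) 100000 with hr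
  by_cases hne : r = 100000
  · simp only [hne, bne_self_eq_false]
    left
    refine ⟨rfl, fun y hy hgood => ?_⟩
    have := h3 y ((hmem y).mpr hy) hgood.1
    omega
  · simp only [bne_iff_ne, ne_eq, hne, not_false_iff, if_true]
    right
    rcases h1 with h1 | h1
    · exact absurd h1 hne
    · exact ⟨(hmem r).mp h1.1, h1.2, by omega,
        fun y hy hc _ => h3 y ((hmem y).mpr hy) hc⟩

-- ---- B side ----

lemma count_takeWhile_of_sorted (x : Int) (xs : List Int)
    (hs : xs.Pairwise (· ≤ ·)) (hx : ∀ y ∈ xs, x ≤ y) :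
    xs.count x = (xs.takeWhile (fun y => y == x)).length := by
  induction xs with
  | nil => simp
  | cons y ys ih =>
    by_cases h : y = x
    · subst h
      simp only [List.count_cons, List.takeWhile_cons, beq_self_eq_true, if_true,
        List.length_cons]
      rw [ih (List.Pairwise.sublist (List.sublist_cons_self _ _) hs)
        (fun z hz => hx z (List.mem_cons_of_mem _ hz))]
    · have hxy : x < y := lt_of_le_of_ne (hx y (List.mem_cons_self)) (Ne.symm h)
      have hynot : x ∉ y :: ys := by
        intro hmem
        rcases List.mem_cons.mp hmem with rfl | hmem
        · omega
        · have := (List.pairwise_cons.mp hs).1 x hmem; omega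
      rw [List.count_eq_zero.mpr hynot]
      simp [h]

lemma lt_of_mem_dropWhile_of_sorted (x : Int) (xs : List Int)
    (hs : xs.Pairwise (· ≤ ·)) (hx : ∀ y ∈ xs, x ≤ y) :
    ∀ y ∈ xs.dropWhile (fun y => y == x), x < y := by
  induction xs with
  | nil => simp
  | cons y ys ih =>
    by_cases h : y = x
    · subst h
      simp only [List.dropWhile_cons, beq_self_eq_true, if_true]
      exact ih (List.Pairwise.sublist (List.sublist_cons_self _ _) hs)
        (fun z hz => hx z (List.mem_cons_of_mem _ hz))
    · have hxy : x < y := lt_of_le_of_ne (hx y (List.mem_cons_self)) (Ne.symm h)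
      simp only [List.dropWhile_cons, beq_iff_eq, h, if_false]
      intro z hz
      rcases List.mem_cons.mp hz with rfl | hz
      · exact hxy
      · have := (List.pairwise_cons.mp hs).1 z hz; omega

lemma scanRuns_isAnswer : ∀ (s : List Int), s.Pairwise (· ≤ ·) → IsAnswer s (scanRuns s) := by
  intro s
  induction s using scanRuns.induct with
  | case1 => intro _; left; simp [scanRuns]
  | case2 x xs hcond =>
    intro hs
    simp only [Bool.and_eq_true, beq_iff_eq, decide_eq_true_eq,
      List.length_eq_zero_iff] at hcond
    obtain ⟨hrun, hlt⟩ := hcond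
    rw [scanRuns]
    simp only [hrun, List.length_nil, beq_self_eq_true, hlt,
      decide_true, Bool.and_self, if_true]
    right
    obtain ⟨hhead, htail⟩ := List.pairwise_cons.mp hs
    refine ⟨List.mem_cons_self, ?_, hlt, ?_⟩
    · rw [List.count_cons_self,
        count_takeWhile_of_sorted x xs htail hhead, hrun]
      simp
    · intro y hy _ _
      rcases List.mem_cons.mp hy with rfl | hy
      · exact le_rfl
      · exact hhead y hy
  | case3 x xs hcond ih =>
    intro hs
    rw [scanRuns]
    simp only [hcond]
    obtain ⟨hhead, htail⟩ := List.pairwise_cons.mp hs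
    have hsplit : xs.takeWhile (fun y => y == x) ++ xs.dropWhile (fun y => y == x) = xs :=
      List.takeWhile_append_dropWhile
    set rest := xs.dropWhile (fun y => y == x) with hrest
    have hrestlt : ∀ y ∈ rest, x < y :=
      lt_of_mem_dropWhile_of_sorted x xs htail hhead
    have hrestsorted : rest.Pairwise (· ≤ ·) :=
      List.Pairwise.sublist (List.dropWhile_sublist _) htail
    have hcount_x : (x :: xs).count x = (xs.takeWhile (fun y => y == x)).length + 1 := by
      rw [List.count_cons_self, count_takeWhile_of_sorted x xs htail hhead]
    -- counts of values other than x agree between x :: xs and rest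
    have hcount_ne : ∀ y : Int, y ≠ x → (x :: xs).count y = rest.count y := by
      intro y hy
      rw [show (x :: xs).count y = xs.count y by simp [Ne.symm hy], ← hsplit,
        List.count_append]
      have : (xs.takeWhile (fun y => y == x)).count y = 0 := by
        rw [List.count_eq_zero]
        intro hmem
        have := List.mem_takeWhile_imp hmem
        simp only [beq_iff_eq] at this
        exact hy this
      omega
    -- x itself is not "good" in x :: xs in this branch
    have hx_not_good : ¬((x :: xs).count x = 1 ∧ x < 100000) := by
      rintro ⟨hc1, hl1⟩
      rw [hcount_x] at hc1
      apply hcond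
      simp only [Bool.and_eq_true, beq_iff_eq, decide_eq_true_eq]
      exact ⟨by omega, hl1⟩
    -- good values of x :: xs are exactly good values of rest
    have hfwd : ∀ y ∈ (x :: xs), (x :: xs).count y = 1 → y < 100000 →
        y ∈ rest ∧ rest.count y = 1 := by
      intro y hy hc hl
      have hyx : y ≠ x := by
        rintro rfl; exact hx_not_good ⟨hc, hl⟩
      have hcr : rest.count y = 1 := by rw [← hcount_ne y hyx]; exact hc
      refine ⟨?_, hcr⟩
      exact List.count_pos_iff.mp (by omega)
    have hbwd : ∀ y ∈ rest, rest.count y = 1 →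
        y ∈ (x :: xs) ∧ (x :: xs).count y = 1 := by
      intro y hy hc
      have hyx : y ≠ x := by have := hrestlt y hy; omega
      exact ⟨List.mem_cons_of_mem _ ((List.dropWhile_sublist _).subset hy),
        by rw [hcount_ne y hyx]; exact hc⟩
    rcases ih hrestsorted with ⟨hr, hnone⟩ | ⟨hm, hc, hl, hmin⟩
    · left
      refine ⟨hr, fun y hy hgood => ?_⟩
      obtain ⟨hyr, hcr⟩ := hfwd y hy hgood.1 hgood.2
      exact hnone y hyr ⟨hcr, hgood.2⟩
    · right
      obtain ⟨hms, hcs⟩ := hbwd _ hm hc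
      refine ⟨hms, hcs, hl, fun y hy hcy hly => ?_⟩
      obtain ⟨hyr, hcr⟩ := hfwd y hy hcy hly
      exact hmin y hyr hcr hly

-- counts and membership transfer along a permutation
lemma isAnswer_perm (s arr : List Int) (hp : s.Perm arr) (r : Int)
    (h : IsAnswer s r) : IsAnswer arr r := by
  have hc : ∀ y : Int, s.count y = arr.count y := fun y => hp.count_eq y
  have hm : ∀ y : Int, y ∈ s ↔ y ∈ arr := fun _ => hp.mem_iff
  rcases h with ⟨hr, hnone⟩ | ⟨hmem, hcnt, hlt, hmin⟩
  · exact Or.inl ⟨hr, fun y hy hg => hnone y ((hm y).mpr hy) ⟨by rw [hc y]; exact hg.1, hg.2⟩⟩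
  · exact Or.inr ⟨(hm r).mp hmem, by rw [← hc r]; exact hcnt, hlt,
      fun y hy hcy hly => hmin y ((hm y).mpr hy) (by rw [hc y]; exact hcy) hly⟩

lemma funcTwins_alt_isAnswer (arr : List Int) (n : Int) (hn : ¬ n = 1) :
    IsAnswer arr (funcTwins_alt arr n) := by
  unfold funcTwins_alt
  simp only [beq_iff_eq, hn, if_false]
  exact isAnswer_perm _ _ (PySem.List.sorted_perm arr _ _) _
    (scanRuns_isAnswer _ (PySem.List.sorted_pairwise arr (fun x => x)))

-- ===== VERDICT (by name: the statement is the Claim_ definition above) =====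
theorem funcTwins_spec : Claim_equal_funcTwins := by
  intro arr n _ hpre
  unfold Spec_funcTwins
  by_cases hn : n = 1
  · subst hn
    unfold funcTwins funcTwins_alt
    simp
  · exact isAnswer_unique arr _ _ (funcTwins_isAnswer arr n hn)
      (funcTwins_alt_isAnswer arr n hn)
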